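-- pv_equiv track=rewrite | github.com/hp457/DSA | Binary Search/BS on Answers/Find the Smallest Divisor.py | smallestDiv
-- ===== SOURCE A (Python) =====
-- import math
--
-- def smallestDiv(nums, threshold):
--
--     n = len(nums)
--     # Maximum divisors that can be possible
--     maxEle = max(nums)
--
--     for num in range(1, maxEle + 1):
--         smallestDivSum = 0
--
--         # Calculate divisor sum for the num ranging from 1 -> maxEle
--         for j in range(n):
--             smallestDivSum += math.ceil(nums[j] / num)
--
--         # If we found the minimum div sum return it.
--         if smallestDivSum <= threshold:
--             return num
-- ===== SOURCE B (Python) =====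
-- def smallestDiv(nums, threshold):
--     hi = max(nums)
--     d = 1
--     while d <= hi:
--         s = 0
--         nxt = hi + 1
--         # one pass: the sum at divisor d, and the next divisor where any term changes
--         for a in nums:
--             m = a - 1 if a > 0 else -a
--             q = m // d
--             s += 1 + q if a > 0 else -q
--             if q > 0:
--                 nxt = min(nxt, m // q + 1)
--         if s <= threshold:
--             return d
--         d = nxt
-- ===== Notes on version B (the rewrite author's own statement) =====
-- stated objective: alternative
-- what changed: A tests every divisor 1..max(nums) and recomputes the ceil-division sum for each; B computes, at each tested divisor, the next divisor at which any ceil term can change and jumps over the whole constant block, so it only ever evaluates block-start divisors (the hinted binary search would be wrong here: with negative elements the sum is not monotone in the divisor).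
import Mathlib
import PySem

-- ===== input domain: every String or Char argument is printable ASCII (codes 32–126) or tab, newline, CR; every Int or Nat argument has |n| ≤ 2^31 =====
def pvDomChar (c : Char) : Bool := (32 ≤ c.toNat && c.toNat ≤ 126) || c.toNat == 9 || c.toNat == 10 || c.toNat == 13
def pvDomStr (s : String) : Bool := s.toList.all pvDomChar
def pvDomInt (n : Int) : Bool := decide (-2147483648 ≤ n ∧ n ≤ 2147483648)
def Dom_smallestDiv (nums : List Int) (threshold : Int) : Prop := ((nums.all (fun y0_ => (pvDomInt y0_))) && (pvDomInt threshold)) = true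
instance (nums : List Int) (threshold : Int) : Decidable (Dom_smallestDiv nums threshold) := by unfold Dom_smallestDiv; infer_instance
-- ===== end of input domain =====

-- B replaces A's divisor-by-divisor scan with divisor-block jumping: at each divisor it also
-- computes the next divisor where any ceil term changes and skips the constant block.

-- ===== PORT A =====
-- math.ceil(a/num): exact ceiling division; on Dom (|a| ≤ 2^31) Python's float division
-- is exact enough that math.ceil(a/num) equals the true ceiling ⌈a/num⌉ = -((-a)//num).
def pvCeilA (a d : Int) : Int := -(PySem.Int.floordiv (-a) d)

-- the inner loop: for j in range(n): smallestDivSum += math.ceil(nums[j] / num)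
def pvSumA (nums : List Int) (num : Int) : Int :=
  (PySem.List.pyRange 0 (PySem.List.len nums) 1).foldl
    (fun acc j => acc + pvCeilA (PySem.List.pyGetD nums j 0) num) 0

-- the outer loop: for num in range(1, maxEle + 1); fuel = number of remaining range elements
def pvALoop (nums : List Int) (threshold : Int) (num : Int) : Nat → Option Int
  | 0 => none
  | fuel + 1 =>
    if pvSumA nums num ≤ threshold then some num
    else pvALoop nums threshold (num + 1) fuel

def smallestDiv (nums : List Int) (threshold : Int) : Option Int :=
  match PySem.List.max? nums (fun x => x) with
  | none => none            -- max([]) raises ValueError in Python; excluded by Pre_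
  | some maxEle => pvALoop nums threshold 1 maxEle.toNat

-- ===== PORT B =====
-- one pass of Source B's for-loop: accumulates (s, nxt)
def pvStep (d : Int) (p : Int × Int) (a : Int) : Int × Int :=
  let m : Int := if a > 0 then a - 1 else -a
  let q : Int := PySem.Int.floordiv m d
  let s : Int := p.1 + (if a > 0 then 1 + q else -q)
  let nxt : Int := if q > 0 then min p.2 (PySem.Int.floordiv m q + 1) else p.2
  (s, nxt)

-- the while loop: d strictly increases each round, so hi.toNat + 1 rounds always suffice
def pvBLoop (nums : List Int) (threshold hi : Int) (d : Int) : Nat → Option Int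
  | 0 => none
  | fuel + 1 =>
    if d ≤ hi then
      let p := nums.foldl (pvStep d) (0, hi + 1)
      if p.1 ≤ threshold then some d
      else pvBLoop nums threshold hi p.2 fuel
    else none

def smallestDiv_alt (nums : List Int) (threshold : Int) : Option Int :=
  match PySem.List.max? nums (fun x => x) with
  | none => none            -- max([]) raises ValueError in Python; excluded by Pre_
  | some hi => pvBLoop nums threshold hi 1 (hi.toNat + 1)

-- ===== PRECONDITION & SPEC =====
-- Pre_ excludes only the empty list, on which Python A raises ValueError (max of empty sequence).
def Pre_smallestDiv (nums : List Int) (threshold : Int) : Prop := nums ≠ []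
instance (nums : List Int) (threshold : Int) : Decidable (Pre_smallestDiv nums threshold) := by unfold Pre_smallestDiv; infer_instance
def pvWitness_smallestDiv : List Int × Int := ([3, 1, 2], 5)

def Spec_smallestDiv (nums : List Int) (threshold : Int) (out : Option Int) : Prop := out = smallestDiv_alt nums threshold
instance (nums : List Int) (threshold : Int) (out : Option Int) : Decidable (Spec_smallestDiv nums threshold out) := by unfold Spec_smallestDiv; infer_instance

-- ===== CLAIM (what is proved, stated in full; the proofs are below) =====
def Claim_equal_smallestDiv : Prop := ∀ (nums : List Int) (threshold : Int), Dom_smallestDiv nums threshold → Pre_smallestDiv nums threshold → Spec_smallestDiv nums threshold (smallestDiv nums threshold)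

-- ===== LEMMAS AND PROOFS =====

def pvS (nums : List Int) (d : Int) : Int := (nums.map (fun a => pvCeilA a d)).sum
def pvM (a : Int) : Int := if a > 0 then a - 1 else -a

theorem pvM_nonneg (a : Int) : 0 ≤ pvM a := by unfold pvM; split <;> omega

theorem pvSumA_eq (nums : List Int) (d : Int) : pvSumA nums d = pvS nums d := by
  unfold pvSumA pvS
  rw [PySem.List.foldl_pyRange_zero_pyGetD nums 0 (fun acc a => acc + pvCeilA a d) 0]
  rw [PySem.List.foldl_add]
  omega

theorem pv_ceil_pos (a d : Int) (_ha : 0 < a) (hd : 0 < d) : -(-a / d) = 1 + (a - 1) / d := by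
  have h1 : d * ((a - 1) / d) + (a - 1) % d = a - 1 := Int.mul_ediv_add_emod _ _
  have h2 : 0 ≤ (a - 1) % d := Int.emod_nonneg _ (by omega)
  have h3 : (a - 1) % d < d := Int.emod_lt_of_pos _ hd
  have h4 : (-a) / d = -((a - 1) / d) - 1 := by
    have := (Int.ediv_emod_unique (a := -a) (b := d)
      (r := d - (a - 1) % d - 1) (q := -((a - 1) / d) - 1) hd).mpr (by constructor <;> [nlinarith; omega])
    exact this.1
  omega

theorem pv_ediv_antitone (m d e : Int) (hm : 0 ≤ m) (hd : 0 < d) (hde : d ≤ e) :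
    m / e ≤ m / d := by
  rw [Int.le_ediv_iff_mul_le hd]
  have he : (0:Int) < e := by omega
  have h0 : 0 ≤ m / e := Int.ediv_nonneg hm (by omega)
  have h1 : m / e * e ≤ m := Int.ediv_mul_le m (by omega)
  nlinarith

theorem pv_ceil_via_m (a d : Int) (hd : 0 < d) :
    pvCeilA a d = (if a > 0 then 1 + PySem.Int.floordiv (pvM a) d else -(PySem.Int.floordiv (pvM a) d)) := by
  unfold pvCeilA pvM
  rw [PySem.Int.floordiv_eq_ediv_of_pos hd, PySem.Int.floordiv_eq_ediv_of_pos hd]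
  split
  · exact pv_ceil_pos a d (by assumption) hd
  · rfl

theorem pv_div_const (m d e : Int) (hm : 0 ≤ m) (hd : 0 < d) (hde : d ≤ e)
    (hblock : m / d = 0 ∨ e ≤ m / (m / d)) : m / e = m / d := by
  have he : (0:Int) < e := by omega
  rcases hblock with h0 | hq
  · have hmd : m < d := by
      by_contra h
      have : (1:Int) ≤ m / d := by rw [Int.le_ediv_iff_mul_le hd]; omega
      omega
    rw [h0]
    exact Int.ediv_eq_zero_of_lt hm (by omega)
  · have hqpos : 0 < m / d := by
      rcases lt_or_ge 0 (m / d) with h | h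
      · exact h
      · have : m / d = 0 := le_antisymm h (Int.ediv_nonneg hm (by omega))
        rw [this] at hq; simp at hq; omega
    have hle : m / e ≤ m / d := pv_ediv_antitone m d e hm hd hde
    have hge : m / d ≤ m / e := by
      rw [Int.le_ediv_iff_mul_le he]
      have h1 : e * (m / d) ≤ m := by
        have := (Int.le_ediv_iff_mul_le hqpos).mp hq
        linarith [this]
      linarith [h1, mul_comm e (m / d)]
    omega

theorem pv_cand_gt (m d : Int) (_hm : 0 ≤ m) (hd : 0 < d) (hq : 0 < m / d) :
    d ≤ m / (m / d) := by
  rw [Int.le_ediv_iff_mul_le hq]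
  have := Int.ediv_mul_le m (show d ≠ 0 by omega)
  nlinarith [this, mul_comm (m / d) d]

theorem pv_fold_props (d : Int) (hd : 0 < d) (l : List Int) :
    ∀ (s0 c0 : Int), d < c0 →
    (l.foldl (pvStep d) (s0, c0)).1 = s0 + pvS l d ∧
    d < (l.foldl (pvStep d) (s0, c0)).2 ∧
    (l.foldl (pvStep d) (s0, c0)).2 ≤ c0 ∧
    (∀ e, d ≤ e → e < (l.foldl (pvStep d) (s0, c0)).2 → pvS l e = pvS l d) := by
  induction l with
  | nil => intro s0 c0 hc; simp [pvS]; omega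
  | cons a l ih =>
    intro s0 c0 hc
    have hstep : pvStep d (s0, c0) a =
        (s0 + (if a > 0 then 1 + PySem.Int.floordiv (pvM a) d else -(PySem.Int.floordiv (pvM a) d)),
         if 0 < PySem.Int.floordiv (pvM a) d
           then min c0 (PySem.Int.floordiv (pvM a) (PySem.Int.floordiv (pvM a) d) + 1)
           else c0) := by
      simp only [pvStep, pvM]
    have hm : 0 ≤ pvM a := pvM_nonneg a
    have hfd : PySem.Int.floordiv (pvM a) d = pvM a / d := PySem.Int.floordiv_eq_ediv_of_pos hd
    have hc1 : d < (pvStep d (s0, c0) a).2 := by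
      rw [hstep]
      dsimp only
      split
      · rename_i hq
        rw [hfd] at hq
        have := pv_cand_gt (pvM a) d hm hd hq
        rw [hfd, PySem.Int.floordiv_eq_ediv_of_pos hq]
        exact lt_min_iff.mpr ⟨hc, by omega⟩
      · exact hc
    have H := ih (pvStep d (s0, c0) a).1 (pvStep d (s0, c0) a).2 hc1
    have hfold : (a :: l).foldl (pvStep d) (s0, c0) =
        l.foldl (pvStep d) ((pvStep d (s0, c0) a).1, (pvStep d (s0, c0) a).2) := by
      simp [List.foldl_cons]
    rw [hfold]
    obtain ⟨H1, H2, H3, H4⟩ := H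
    have hterm : pvCeilA a d = (if a > 0 then 1 + PySem.Int.floordiv (pvM a) d else -(PySem.Int.floordiv (pvM a) d)) :=
      pv_ceil_via_m a d hd
    refine ⟨?_, H2, ?_, ?_⟩
    · rw [H1]
      have : pvS (a :: l) d = pvCeilA a d + pvS l d := by simp [pvS]
      rw [this, hterm, hstep]
      dsimp only
      ring
    · have hc0 : (pvStep d (s0, c0) a).2 ≤ c0 := by
        rw [hstep]; dsimp only; split
        · exact min_le_left _ _
        · exact le_refl _
      omega
    · intro e hde hlt
      have he : 0 < e := by omega
      have htail := H4 e hde hlt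
      have hhead : pvCeilA a e = pvCeilA a d := by
        rw [pv_ceil_via_m a d hd, pv_ceil_via_m a e he]
        have hdiveq : PySem.Int.floordiv (pvM a) e = PySem.Int.floordiv (pvM a) d := by
          rw [hfd, PySem.Int.floordiv_eq_ediv_of_pos he]
          apply pv_div_const (pvM a) d e hm hd hde
          by_cases hq : 0 < pvM a / d
          · right
            have hlt2 : e < (pvStep d (s0, c0) a).2 := lt_of_lt_of_le hlt H3
            rw [hstep] at hlt2; dsimp only at hlt2
            rw [hfd] at hlt2
            rw [if_pos hq] at hlt2
            have := lt_of_lt_of_le hlt2 (min_le_right _ _)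
            rw [PySem.Int.floordiv_eq_ediv_of_pos hq] at this
            omega
          · left
            have : 0 ≤ pvM a / d := Int.ediv_nonneg hm (by omega)
            omega
        rw [hdiveq]
      simp only [pvS, List.map_cons, List.sum_cons] at *
      rw [hhead, htail]

theorem pvALoop_skip (nums : List Int) (t : Int) :
    ∀ (fuel : Nat) (d nxt : Int), d ≤ nxt → nxt ≤ d + fuel →
    (∀ e, d ≤ e → e < nxt → ¬ pvSumA nums e ≤ t) →
    pvALoop nums t d fuel = pvALoop nums t nxt (fuel - (nxt - d).toNat) := by
  intro fuel
  induction fuel with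
  | zero =>
    intro d nxt h1 h2 _
    have : nxt = d := by omega
    subst this; simp
  | succ f ih =>
    intro d nxt h1 h2 hall
    rcases eq_or_lt_of_le h1 with heq | hlt
    · subst heq; simp
    · have hnd : ¬ pvSumA nums d ≤ t := hall d le_rfl hlt
      have hstep : pvALoop nums t d (f + 1) = pvALoop nums t (d + 1) f := by
        simp only [pvALoop, if_neg hnd]
      rw [hstep, ih (d + 1) nxt (by omega) (by omega)
        (fun e he1 he2 => hall e (by omega) he2)]
      congr 1
      omega

theorem pv_main (nums : List Int) (t hi : Int) :
    ∀ (fuelB : Nat) (d : Int), 0 < d → (hi + 1 - d).toNat < fuelB →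
    pvALoop nums t d (hi + 1 - d).toNat = pvBLoop nums t hi d fuelB := by
  intro fuelB
  induction fuelB with
  | zero => intro d _ h; omega
  | succ f ih =>
    intro d hd hfuel
    by_cases hdh : d ≤ hi
    · have hprops := pv_fold_props d hd nums 0 (hi + 1) (by omega)
      obtain ⟨H1, H2, H3, H4⟩ := hprops
      set p := nums.foldl (pvStep d) (0, hi + 1) with hp
      have hps : p.1 = pvSumA nums d := by rw [H1, pvSumA_eq]; omega
      by_cases hs : pvSumA nums d ≤ t
      · have hA : pvALoop nums t d (hi + 1 - d).toNat = some d := by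
          have : (hi + 1 - d).toNat = (hi - d).toNat + 1 := by omega
          rw [this]
          simp only [pvALoop, if_pos hs]
        have hB : pvBLoop nums t hi d (f + 1) = some d := by
          simp only [pvBLoop, if_pos hdh, ← hp]
          rw [hps] at *
          simp [hs]
        rw [hA, hB]
      · have hskip : pvALoop nums t d (hi + 1 - d).toNat =
            pvALoop nums t p.2 ((hi + 1 - d).toNat - (p.2 - d).toNat) := by
          apply pvALoop_skip nums t _ d p.2 (by omega) (by omega)
          intro e he1 he2
          rw [pvSumA_eq, H4 e he1 he2, ← pvSumA_eq]
          exact hs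
        have harith : (hi + 1 - d).toNat - (p.2 - d).toNat = (hi + 1 - p.2).toNat := by omega
        have hB : pvBLoop nums t hi d (f + 1) = pvBLoop nums t hi p.2 f := by
          simp only [pvBLoop, if_pos hdh, ← hp]
          rw [if_neg (by rw [hps]; exact hs)]
        rw [hskip, harith, hB]
        exact ih p.2 (by omega) (by omega)
    · have h0 : (hi + 1 - d).toNat = 0 := by omega
      rw [h0]
      simp only [pvALoop, pvBLoop, if_neg hdh]

-- ===== VERDICT (by name: the statement is the Claim_ definition above) =====
theorem smallestDiv_spec : Claim_equal_smallestDiv := by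
  intro nums threshold _ hpre
  unfold Spec_smallestDiv smallestDiv smallestDiv_alt
  cases h : PySem.List.max? nums (fun x => x) with
  | none => exact absurd ((PySem.List.max?_eq_none_iff _ _).mp h) hpre
  | some hi =>
    have h1 : (hi + 1 - 1).toNat = hi.toNat := by omega
    have := pv_main nums threshold hi (hi.toNat + 1) 1 (by omega) (by omega)
    rw [h1] at this
    exact this
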